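-- pv_equiv track=rewrite | github.com/Lewistrick/adventofcode2022 | day15.py | find_distress_beacon
-- ===== SOURCE A (Python) =====
-- def find_distress_beacon(sensors, beacons, distances, target_y):
--     x_ranges = []
--     for (sx, sy), (bx, by), dist in zip(sensors, beacons, distances):
--         # Part 1
--         dist_tgt = abs(sy - target_y)
--         if dist_tgt > dist:
--             continue
--
--         # find the range of x values that are within the distance to the target
--         rest_dist = dist - dist_tgt
--         newrange = (sx - rest_dist, sx + rest_dist)
--
--         if newrange[0] == newrange[1] == bx:
--             continue
--
--         if by == target_y:
--             if newrange[0] == bx: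
--                 newrange = (bx + 1, newrange[1])
--             elif newrange[1] == bx:
--                 newrange = (newrange[0], bx - 1)
--
--         if newrange[0] > newrange[1]:
--             continue
--
--         x_ranges.append(newrange)
--
--     x_ranges.sort()
--
--     # merge overlapping ranges
--     merged = []
--     for x1, x2 in x_ranges:
--         if not merged or merged[-1][1] < x1 - 1:
--             merged.append((x1, x2))
--         else:
--             merged[-1] = (merged[-1][0], max(merged[-1][1], x2))
--
--     return merged
-- ===== SOURCE B (Python) =====
-- # B: same per-row interval construction, but merging is done incrementally by
-- # inserting each interval into an always-sorted, disjoint, gap-separated list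
-- # (no sort call, no final merge pass).
--
-- def _row_interval(sx, sy, bx, by, dist, target_y):
--     rest = dist - abs(sy - target_y)
--     if rest < 0:
--         return None
--     lo, hi = sx - rest, sx + rest
--     if lo == hi == bx:
--         return None
--     if by == target_y:
--         if lo == bx:
--             lo += 1
--         elif hi == bx:
--             hi -= 1
--     if lo > hi:
--         return None
--     return (lo, hi)
--
--
-- def _insert(merged, a, b):
--     """Insert [a,b] into a sorted disjoint list, fusing overlaps/adjacency."""
--     res = []
--     i = 0
--     n = len(merged)
--     while i < n and merged[i][1] < a - 1:
--         res.append(merged[i])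
--         i += 1
--     while i < n and merged[i][0] <= b + 1:
--         a = min(a, merged[i][0])
--         b = max(b, merged[i][1])
--         i += 1
--     res.append((a, b))
--     res.extend(merged[i:])
--     return res
--
--
-- def find_distress_beacon(sensors, beacons, distances, target_y):
--     merged = []
--     for (sx, sy), (bx, by), dist in zip(sensors, beacons, distances):
--         iv = _row_interval(sx, sy, bx, by, dist, target_y)
--         if iv is not None:
--             merged = _insert(merged, iv[0], iv[1])
--     return merged
-- ===== Notes on version B (the rewrite author's own statement) =====
-- stated objective: alternative
-- what changed: The sort of all per-sensor intervals followed by a left-to-right merge pass is replaced by incremental insertion of each interval into an always-sorted, disjoint, gap-separated interval list (fusing overlapping/adjacent intervals on insertion); no sort call and no separate merge pass remain.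
import Mathlib
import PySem

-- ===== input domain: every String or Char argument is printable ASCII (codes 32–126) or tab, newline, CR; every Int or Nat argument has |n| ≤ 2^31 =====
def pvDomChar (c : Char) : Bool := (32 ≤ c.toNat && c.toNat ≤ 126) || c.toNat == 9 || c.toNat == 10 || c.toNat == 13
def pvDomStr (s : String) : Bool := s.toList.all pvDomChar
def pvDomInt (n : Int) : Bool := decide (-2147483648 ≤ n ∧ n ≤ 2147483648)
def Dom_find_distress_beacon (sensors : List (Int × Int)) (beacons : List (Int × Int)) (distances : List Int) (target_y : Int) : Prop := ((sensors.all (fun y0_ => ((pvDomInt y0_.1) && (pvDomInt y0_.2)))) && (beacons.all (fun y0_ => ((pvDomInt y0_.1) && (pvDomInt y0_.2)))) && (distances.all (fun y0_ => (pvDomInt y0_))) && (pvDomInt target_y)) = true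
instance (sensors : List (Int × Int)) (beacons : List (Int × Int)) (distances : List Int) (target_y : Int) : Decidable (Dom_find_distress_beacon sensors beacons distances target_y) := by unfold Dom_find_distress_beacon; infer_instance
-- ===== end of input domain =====

-- B replaces A's sort-then-merge of the per-sensor intervals by incremental insertion
-- into an always-sorted disjoint interval list (objective: alternative algorithm).

-- ===== PORT A =====
-- body of A's interval-building loop (one sensor/beacon/distance triple)
def pvStepA (target_y : Int) (x_ranges : List (Int × Int)) (t : (Int × Int) × (Int × Int) × Int) : List (Int × Int) :=
  let sx := t.1.1; let sy := t.1.2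
  let bx := t.2.1.1; let by_ := t.2.1.2
  let dist := t.2.2
  let dist_tgt := |sy - target_y|
  if dist_tgt > dist then x_ranges else
  let rest_dist := dist - dist_tgt
  let newrange := (sx - rest_dist, sx + rest_dist)
  if newrange.1 = newrange.2 ∧ newrange.2 = bx then x_ranges else
  let newrange :=
    if by_ = target_y then
      (if newrange.1 = bx then (bx + 1, newrange.2)
       else if newrange.2 = bx then (newrange.1, bx - 1)
       else newrange)
    else newrange
  if newrange.1 > newrange.2 then x_ranges else
  x_ranges ++ [newrange]

-- body of A's merge loop: append, or fuse into the last merged interval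
def pvMergeStep (merged : List (Int × Int)) (xr : Int × Int) : List (Int × Int) :=
  if merged = [] ∨ (merged.getLastD (0, 0)).2 < xr.1 - 1 then
    merged ++ [(xr.1, xr.2)]
  else
    merged.dropLast ++ [((merged.getLastD (0, 0)).1, max (merged.getLastD (0, 0)).2 xr.2)]

def find_distress_beacon (sensors : List (Int × Int)) (beacons : List (Int × Int)) (distances : List Int) (target_y : Int) : List (Int × Int) :=
  let x_ranges := (List.zip sensors (List.zip beacons distances)).foldl (pvStepA target_y) []
  let x_ranges := PySem.List.sorted2 x_ranges Prod.fst Prod.snd false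
  x_ranges.foldl pvMergeStep []

-- ===== PORT B =====
-- Source B _row_interval
def pvRowInterval (sx sy bx by_ dist target_y : Int) : Option (Int × Int) :=
  let rest := dist - |sy - target_y|
  if rest < 0 then none else
  let lo := sx - rest
  let hi := sx + rest
  if lo = hi ∧ hi = bx then none else
  let lohi :=
    if by_ = target_y then
      (if lo = bx then (lo + 1, hi)
       else if hi = bx then (lo, hi - 1)
       else (lo, hi))
    else (lo, hi)
  if lohi.1 > lohi.2 then none else some lohi

-- Source B _insert, second while loop: absorb every interval touching [a, b]
def pvAbsorb : List (Int × Int) → Int → Int → List (Int × Int)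
  | [], a, b => [(a, b)]
  | (c, d) :: rest, a, b =>
    if c ≤ b + 1 then pvAbsorb rest (min a c) (max b d)
    else (a, b) :: (c, d) :: rest

-- Source B _insert, first while loop: keep the intervals entirely left of [a, b]
def pvInsert : List (Int × Int) → Int → Int → List (Int × Int)
  | [], a, b => [(a, b)]
  | (c, d) :: rest, a, b =>
    if d < a - 1 then (c, d) :: pvInsert rest a b
    else pvAbsorb ((c, d) :: rest) a b

def find_distress_beacon_alt (sensors : List (Int × Int)) (beacons : List (Int × Int)) (distances : List Int) (target_y : Int) : List (Int × Int) :=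
  (List.zip sensors (List.zip beacons distances)).foldl (fun merged t =>
    match pvRowInterval t.1.1 t.1.2 t.2.1.1 t.2.1.2 t.2.2 target_y with
    | none => merged
    | some iv => pvInsert merged iv.1 iv.2) []

-- ===== PRECONDITION & SPEC =====
def Spec_find_distress_beacon (sensors : List (Int × Int)) (beacons : List (Int × Int)) (distances : List Int) (target_y : Int) (out : List (Int × Int)) : Prop := out = find_distress_beacon_alt sensors beacons distances target_y
instance (sensors : List (Int × Int)) (beacons : List (Int × Int)) (distances : List Int) (target_y : Int) (out : List (Int × Int)) : Decidable (Spec_find_distress_beacon sensors beacons distances target_y out) := by unfold Spec_find_distress_beacon; infer_instance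

-- ===== CLAIM (what is proved, stated in full; the proofs are below) =====
def Claim_equal_find_distress_beacon : Prop := ∀ (sensors : List (Int × Int)) (beacons : List (Int × Int)) (distances : List Int) (target_y : Int), Dom_find_distress_beacon sensors beacons distances target_y → Spec_find_distress_beacon sensors beacons distances target_y (find_distress_beacon sensors beacons distances target_y)

-- ===== LEMMAS AND PROOFS =====

-- the multiset of per-sensor intervals both programs act on
def pvIvs (sensors beacons : List (Int × Int)) (distances : List Int) (target_y : Int) : List (Int × Int) :=
  (List.zip sensors (List.zip beacons distances)).filterMap
    (fun t => pvRowInterval t.1.1 t.1.2 t.2.1.1 t.2.1.2 t.2.2 target_y)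

-- set of covered integers
def pvCov (l : List (Int × Int)) (x : Int) : Prop := ∃ p ∈ l, p.1 ≤ x ∧ x ≤ p.2

-- canonical merged form: valid intervals, separated by gaps of at least one integer
def pvCanon (l : List (Int × Int)) : Prop :=
  (∀ p ∈ l, p.1 ≤ p.2) ∧ List.IsChain (fun p q : Int × Int => p.2 + 1 < q.1) l

-- A's merge loop as structural recursion
def pvGo (a b : Int) : List (Int × Int) → List (Int × Int)
  | [] => [(a, b)]
  | (c, d) :: rest => if b < c - 1 then (a, b) :: pvGo c d rest else pvGo a (max b d) rest

def pvMergeRec : List (Int × Int) → List (Int × Int)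
  | [] => []
  | (a, b) :: rest => pvGo a b rest

-- ---- step 1: both interval-building loops produce pvIvs ----

theorem pvStepA_eq (ty : Int) (acc : List (Int × Int)) (t : (Int × Int) × (Int × Int) × Int) :
    pvStepA ty acc t = acc ++ (pvRowInterval t.1.1 t.1.2 t.2.1.1 t.2.1.2 t.2.2 ty).toList := by
  obtain ⟨⟨sx, sy⟩, ⟨bx, by_⟩, dist⟩ := t
  simp only [pvStepA, pvRowInterval]
  by_cases h1 : |sy - ty| > dist
  · simp [h1, show dist - |sy - ty| < 0 by omega]
  · simp only [if_neg h1, if_neg (show ¬(dist - |sy - ty| < 0) by omega)]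
    split_ifs <;> simp_all <;> omega

theorem pv_foldA_eq (ty : Int) (l : List ((Int × Int) × (Int × Int) × Int)) (acc : List (Int × Int)) :
    l.foldl (pvStepA ty) acc
      = acc ++ l.filterMap (fun t => pvRowInterval t.1.1 t.1.2 t.2.1.1 t.2.1.2 t.2.2 ty) := by
  induction l generalizing acc with
  | nil => simp
  | cons t l ih =>
    simp only [List.foldl_cons, List.filterMap_cons, ih, pvStepA_eq]
    cases pvRowInterval t.1.1 t.1.2 t.2.1.1 t.2.1.2 t.2.2 ty <;> simp

-- ---- step 2: A's merge loop equals pvMergeRec ----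

theorem pvMergeStep_ne_nil (m : List (Int × Int)) (p : Int × Int) : pvMergeStep m p ≠ [] := by
  unfold pvMergeStep; split_ifs <;> simp

theorem pvMergeStep_append (acc m : List (Int × Int)) (p : Int × Int) (hm : m ≠ []) :
    pvMergeStep (acc ++ m) p = acc ++ pvMergeStep m p := by
  rcases m.eq_nil_or_concat with rfl | ⟨ys, y, rfl⟩
  · exact absurd rfl hm
  · simp only [List.concat_eq_append, pvMergeStep, ← List.append_assoc,
      List.getLastD_concat, List.dropLast_concat]
    split_ifs with h1 h2 <;> simp_all <;> omega

theorem pv_foldl_mergeStep_append (l : List (Int × Int)) (acc m : List (Int × Int)) (hm : m ≠ []) :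
    l.foldl pvMergeStep (acc ++ m) = acc ++ l.foldl pvMergeStep m := by
  induction l generalizing m with
  | nil => simp
  | cons p l ih =>
    simp only [List.foldl_cons, pvMergeStep_append acc m p hm]
    exact ih _ (pvMergeStep_ne_nil m p)

theorem pv_foldl_mergeStep_eq_go (l : List (Int × Int)) (a b : Int) :
    l.foldl pvMergeStep [(a, b)] = pvGo a b l := by
  induction l generalizing a b with
  | nil => rfl
  | cons p l ih =>
    obtain ⟨c, d⟩ := p
    simp only [List.foldl_cons, pvGo]
    by_cases h : b < c - 1
    · rw [show pvMergeStep [(a, b)] (c, d) = [(a, b)] ++ [(c, d)] by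
        unfold pvMergeStep; simp [h]]
      rw [pv_foldl_mergeStep_append l [(a, b)] [(c, d)] (by simp), ih, if_pos h]
      rfl
    · rw [show pvMergeStep [(a, b)] (c, d) = [(a, max b d)] by
        unfold pvMergeStep; simp [h]]
      rw [ih, if_neg h]

theorem pv_merge_eq_mergeRec (l : List (Int × Int)) :
    l.foldl pvMergeStep [] = pvMergeRec l := by
  cases l with
  | nil => rfl
  | cons p l =>
    obtain ⟨a, b⟩ := p
    simp only [List.foldl_cons, pvMergeRec]
    rw [show pvMergeStep [] (a, b) = [(a, b)] by unfold pvMergeStep; simp]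
    exact pv_foldl_mergeStep_eq_go l a b

-- ---- step 3: pairwise-by-fst of the Python sort ----

theorem pv_insertBy_lex_pairwise (x : Int × Int) (ys : List (Int × Int))
    (h : ys.Pairwise (fun p q : Int × Int => p.1 < q.1 ∨ (p.1 = q.1 ∧ p.2 ≤ q.2))) :
    (PySem.List.insertBy (fun a b : Int × Int => decide (a.1 < b.1) || (!decide (b.1 < a.1) && decide (a.2 < b.2))) x ys).Pairwise
      (fun p q : Int × Int => p.1 < q.1 ∨ (p.1 = q.1 ∧ p.2 ≤ q.2)) := by
  induction ys with
  | nil => simp [PySem.List.insertBy]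
  | cons y ys ih =>
    rw [PySem.List.insertBy.eq_2]
    rcases h with _ | ⟨hy, hys⟩
    split_ifs with hb
    · refine List.Pairwise.cons ?_ (List.Pairwise.cons hy hys)
      intro z hz
      rcases List.mem_cons.mp hz with rfl | hz
      · simp at hb
        omega
      · have := hy z hz
        simp at hb
        omega
    · refine List.Pairwise.cons ?_ (ih hys)
      intro z hz
      rw [PySem.List.insertBy_mem_iff] at hz
      rcases hz with rfl | hz
      · simp at hb
        omega
      · exact hy z hz

theorem pv_sorted2_pairwise (xs : List (Int × Int)) :
    (PySem.List.sorted2 xs Prod.fst Prod.snd false).Pairwise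
      (fun p q : Int × Int => p.1 < q.1 ∨ (p.1 = q.1 ∧ p.2 ≤ q.2)) := by
  show (xs.foldl (fun acc x => PySem.List.insertBy _ x acc) []).Pairwise _
  induction xs using List.reverseRecOn with
  | nil => simp
  | append_singleton xs x ih =>
      rw [List.foldl_append]
      exact pv_insertBy_lex_pairwise x _ ih

-- ---- step 4: correctness of pvMergeRec on a fst-sorted list ----

theorem pvGo_shape (l : List (Int × Int)) (a b : Int) :
    ∃ b' t, pvGo a b l = (a, b') :: t := by
  induction l generalizing a b with
  | nil => exact ⟨b, [], rfl⟩
  | cons p l ih =>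
    obtain ⟨c, d⟩ := p
    simp only [pvGo]
    split_ifs
    · exact ⟨b, pvGo c d l, rfl⟩
    · exact ih a (max b d)

theorem pvGo_canon (l : List (Int × Int)) (a b : Int)
    (hv : ∀ p ∈ l, p.1 ≤ p.2) (hs : l.Pairwise (fun p q : Int × Int => p.1 ≤ q.1))
    (hab : a ≤ b) (hal : ∀ p ∈ l, a ≤ p.1) :
    pvCanon (pvGo a b l) := by
  induction l generalizing a b with
  | nil => exact ⟨by simp [pvGo, hab], by simp [pvGo]⟩
  | cons p l ih =>
    obtain ⟨c, d⟩ := p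
    have hcd : c ≤ d := hv (c, d) (by simp)
    have hac : a ≤ c := hal (c, d) (by simp)
    rcases hs with _ | ⟨hc, hs⟩
    simp only [pvGo]
    split_ifs with h
    · obtain ⟨hv', hch⟩ := ih c d (fun q hq => hv q (List.mem_cons_of_mem _ hq)) hs hcd
        (fun q hq => hc q hq)
      obtain ⟨b', t, heq⟩ := pvGo_shape l c d
      refine ⟨?_, ?_⟩
      · intro q hq
        rcases List.mem_cons.mp hq with rfl | hq
        · exact hab
        · exact hv' q hq
      · rw [heq] at hch ⊢
        exact hch.cons_cons (by simpa using (by omega : b + 1 < c))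
    · exact ih a (max b d) (fun q hq => hv q (List.mem_cons_of_mem _ hq)) hs (by omega)
        (fun q hq => le_trans hac (hc q hq))

theorem pvGo_cov (l : List (Int × Int)) (a b : Int)
    (hv : ∀ p ∈ l, p.1 ≤ p.2) (hs : l.Pairwise (fun p q : Int × Int => p.1 ≤ q.1))
    (hab : a ≤ b) (hal : ∀ p ∈ l, a ≤ p.1) (x : Int) :
    pvCov (pvGo a b l) x ↔ ((a ≤ x ∧ x ≤ b) ∨ pvCov l x) := by
  induction l generalizing a b with
  | nil => simp [pvGo, pvCov]
  | cons p l ih =>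
    obtain ⟨c, d⟩ := p
    have hcd : c ≤ d := hv (c, d) (by simp)
    have hac : a ≤ c := hal (c, d) (by simp)
    rcases hs with _ | ⟨hc, hs⟩
    simp only [pvGo]
    split_ifs with h
    · rw [show pvCov ((a, b) :: pvGo c d l) x ↔ ((a ≤ x ∧ x ≤ b) ∨ pvCov (pvGo c d l) x) by
        simp [pvCov]]
      rw [ih c d (fun q hq => hv q (List.mem_cons_of_mem _ hq)) hs hcd (fun q hq => hc q hq)]
      simp only [pvCov, List.mem_cons]
      constructor
      · rintro (h' | (h' | ⟨q, hq, hqx⟩))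
        · exact Or.inl h'
        · exact Or.inr ⟨(c, d), Or.inl rfl, h'⟩
        · exact Or.inr ⟨q, Or.inr hq, hqx⟩
      · rintro (h' | ⟨q, (rfl | hq), hqx⟩)
        · exact Or.inl h'
        · exact Or.inr (Or.inl hqx)
        · exact Or.inr (Or.inr ⟨q, hq, hqx⟩)
    · rw [ih a (max b d) (fun q hq => hv q (List.mem_cons_of_mem _ hq)) hs (by omega)
        (fun q hq => le_trans hac (hc q hq))]
      simp only [pvCov, List.mem_cons]
      constructor
      · rintro (h' | ⟨q, hq, hqx⟩)
        · by_cases hxb : x ≤ b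
          · exact Or.inl ⟨h'.1, hxb⟩
          · exact Or.inr ⟨(c, d), Or.inl rfl, by omega⟩
        · exact Or.inr ⟨q, Or.inr hq, hqx⟩
      · rintro (h' | ⟨q, (rfl | hq), hqx⟩)
        · exact Or.inl ⟨h'.1, by omega⟩
        · exact Or.inl ⟨by omega, by omega⟩
        · exact Or.inr ⟨q, hq, hqx⟩

theorem pvMergeRec_canon (l : List (Int × Int))
    (hv : ∀ p ∈ l, p.1 ≤ p.2) (hs : l.Pairwise (fun p q : Int × Int => p.1 ≤ q.1)) :
    pvCanon (pvMergeRec l) := by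
  cases l with
  | nil => exact ⟨by simp [pvMergeRec], by simp [pvMergeRec]⟩
  | cons p l =>
    obtain ⟨a, b⟩ := p
    rcases hs with _ | ⟨hc, hs⟩
    exact pvGo_canon l a b (fun q hq => hv q (List.mem_cons_of_mem _ hq)) hs
      (hv (a, b) (by simp)) (fun q hq => hc q hq)

theorem pvMergeRec_cov (l : List (Int × Int))
    (hv : ∀ p ∈ l, p.1 ≤ p.2) (hs : l.Pairwise (fun p q : Int × Int => p.1 ≤ q.1)) (x : Int) :
    pvCov (pvMergeRec l) x ↔ pvCov l x := by
  cases l with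
  | nil => simp [pvMergeRec]
  | cons p l =>
    obtain ⟨a, b⟩ := p
    rcases hs with _ | ⟨hc, hs⟩
    rw [show pvMergeRec ((a, b) :: l) = pvGo a b l from rfl]
    rw [pvGo_cov l a b (fun q hq => hv q (List.mem_cons_of_mem _ hq)) hs
      (hv (a, b) (by simp)) (fun q hq => hc q hq)]
    simp [pvCov]

-- ---- step 5: correctness of pvInsert on a canonical list ----

theorem pvCanon_tail (c d : Int) (l : List (Int × Int)) (h : pvCanon ((c, d) :: l)) :
    pvCanon l := by
  obtain ⟨hv, hch⟩ := h
  exact ⟨fun q hq => hv q (List.mem_cons_of_mem _ hq), hch.tail⟩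

theorem pvCanon_tail_gt (c d : Int) (l : List (Int × Int)) (h : pvCanon ((c, d) :: l)) :
    ∀ p ∈ l, d + 1 < p.1 := by
  induction l generalizing c d with
  | nil => simp
  | cons q l ih =>
    obtain ⟨e, f⟩ := q
    obtain ⟨hv, hch⟩ := h
    have hef : e ≤ f := hv (e, f) (by simp)
    have hde : d + 1 < e := (List.isChain_cons_cons.mp hch).1
    intro p hp
    rcases List.mem_cons.mp hp with rfl | hp
    · exact hde
    · have := ih e f ⟨fun q hq => hv q (List.mem_cons_of_mem _ hq), hch.tail⟩ p hp
      omega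

theorem pvAbsorb_spec (l : List (Int × Int)) (a b : Int)
    (hc : pvCanon l) (hab : a ≤ b) (hh : ∀ c d rest, l = (c, d) :: rest → a ≤ d + 1) :
    pvCanon (pvAbsorb l a b)
    ∧ (∀ x, pvCov (pvAbsorb l a b) x ↔ ((a ≤ x ∧ x ≤ b) ∨ pvCov l x))
    ∧ (∃ a' b' t, pvAbsorb l a b = (a', b') :: t ∧ a' ≤ a ∧ (a' = a ∨ ∃ p ∈ l, a' = p.1)) := by
  induction l generalizing a b with
  | nil =>
    refine ⟨⟨by simp [pvAbsorb, hab], by simp [pvAbsorb]⟩, fun x => by simp [pvAbsorb, pvCov], ?_⟩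
    exact ⟨a, b, [], rfl, le_refl a, Or.inl rfl⟩
  | cons p l ih =>
    obtain ⟨c, d⟩ := p
    have hcd : c ≤ d := hc.1 (c, d) (by simp)
    have had : a ≤ d + 1 := hh c d l rfl
    simp only [pvAbsorb]
    split_ifs with h
    · -- absorb (c, d)
      have hh' : ∀ c' d' rest, l = (c', d') :: rest → min a c ≤ d' + 1 := by
        intro c' d' rest hl
        have := pvCanon_tail_gt c d l hc (c', d') (by rw [hl]; simp)
        simp only at this
        have hc'd' : c' ≤ d' := (pvCanon_tail c d l hc).1 (c', d') (by rw [hl]; simp)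
        omega
      obtain ⟨ih1, ih2, ih3⟩ := ih (min a c) (max b d) (pvCanon_tail c d l hc) (by omega) hh'
      refine ⟨ih1, ?_, ?_⟩
      · intro x
        rw [ih2 x]
        simp only [pvCov, List.mem_cons]
        constructor
        · rintro (h' | ⟨q, hq, hqx⟩)
          · by_cases hx : a ≤ x ∧ x ≤ b
            · exact Or.inl hx
            · exact Or.inr ⟨(c, d), Or.inl rfl, by simp at h' ⊢; omega⟩
          · exact Or.inr ⟨q, Or.inr hq, hqx⟩
        · rintro (h' | ⟨q, (rfl | hq), hqx⟩)
          · exact Or.inl ⟨by omega, by omega⟩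
          · exact Or.inl ⟨by simp at hqx ⊢; omega, by simp at hqx ⊢; omega⟩
          · exact Or.inr ⟨q, hq, hqx⟩
      · obtain ⟨a', b', t, heq, hle, hor⟩ := ih3
        refine ⟨a', b', t, heq, by omega, ?_⟩
        rcases hor with h' | ⟨q, hq, h'⟩
        · rcases le_total a c with h'' | h''
          · exact Or.inl (by omega)
          · exact Or.inr ⟨(c, d), by simp, by omega⟩
        · exact Or.inr ⟨q, List.mem_cons_of_mem _ hq, h'⟩
    · -- prepend (a, b)
      refine ⟨⟨?_, ?_⟩, fun x => by simp [pvCov], ⟨a, b, (c, d) :: l, rfl, le_refl a, Or.inl rfl⟩⟩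
      · intro q hq
        rcases List.mem_cons.mp hq with rfl | hq
        · exact hab
        · exact hc.1 q hq
      · exact hc.2.cons_cons (by simpa using (by omega : b + 1 < c))

theorem pvInsert_spec (l : List (Int × Int)) (a b : Int)
    (hc : pvCanon l) (hab : a ≤ b) :
    pvCanon (pvInsert l a b)
    ∧ (∀ x, pvCov (pvInsert l a b) x ↔ ((a ≤ x ∧ x ≤ b) ∨ pvCov l x)) := by
  induction l generalizing a b with
  | nil => exact ⟨⟨by simp [pvInsert, hab], by simp [pvInsert]⟩, fun x => by simp [pvInsert, pvCov]⟩
  | cons p l ih =>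
    obtain ⟨c, d⟩ := p
    simp only [pvInsert]
    split_ifs with h
    · -- keep (c, d), insert into the tail
      obtain ⟨ih1, ih2⟩ := ih a b (pvCanon_tail c d l hc) hab
      refine ⟨⟨?_, ?_⟩, ?_⟩
      · intro q hq
        rcases List.mem_cons.mp hq with rfl | hq
        · exact hc.1 (c, d) (by simp)
        · exact ih1.1 q hq
      · -- chain: (c, d) gaps to the head of pvInsert l a b
        rcases hl : pvInsert l a b with _ | ⟨⟨a', b'⟩, t⟩
        · simp
        · rw [hl] at ih1
          have ha'b' : a' ≤ b' := ih1.1 (a', b') (by simp)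
          have hcov : pvCov (pvInsert l a b) a' := by
            rw [hl]; exact ⟨(a', b'), by simp, le_refl a', ha'b'⟩
          rw [ih2 a'] at hcov
          have hgt : d + 1 < a' := by
            rcases hcov with h' | ⟨q, hq, hqx⟩
            · omega
            · have := pvCanon_tail_gt c d l hc q hq
              omega
          exact ih1.2.cons_cons (by simpa using hgt)
      · intro x
        rw [show pvCov ((c, d) :: pvInsert l a b) x ↔ ((c ≤ x ∧ x ≤ d) ∨ pvCov (pvInsert l a b) x)
            by simp [pvCov], ih2 x]
        simp only [pvCov, List.mem_cons]
        constructor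
        · rintro (h' | (h' | ⟨q, hq, hqx⟩))
          · exact Or.inr ⟨(c, d), Or.inl rfl, h'⟩
          · exact Or.inl h'
          · exact Or.inr ⟨q, Or.inr hq, hqx⟩
        · rintro (h' | ⟨q, (rfl | hq), hqx⟩)
          · exact Or.inr (Or.inl h')
          · exact Or.inl hqx
          · exact Or.inr (Or.inr ⟨q, hq, hqx⟩)
    · -- hand over to pvAbsorb
      obtain ⟨h1, h2, _⟩ := pvAbsorb_spec ((c, d) :: l) a b hc hab
        (by rintro c' d' rest ⟨rfl, rfl⟩; omega)
      exact ⟨h1, h2⟩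

-- ---- step 6: B's fold over pvIvs ----

theorem pv_foldInsert_spec (ivs : List (Int × Int)) (m : List (Int × Int))
    (hv : ∀ p ∈ ivs, p.1 ≤ p.2) (hm : pvCanon m) :
    pvCanon (ivs.foldl (fun m p => pvInsert m p.1 p.2) m)
    ∧ (∀ x, pvCov (ivs.foldl (fun m p => pvInsert m p.1 p.2) m) x ↔ (pvCov m x ∨ pvCov ivs x)) := by
  induction ivs generalizing m with
  | nil => exact ⟨hm, fun x => by simp [pvCov]⟩
  | cons p ivs ih =>
    obtain ⟨a, b⟩ := p
    have hab : a ≤ b := hv (a, b) (by simp)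
    obtain ⟨h1, h2⟩ := pvInsert_spec m a b hm hab
    obtain ⟨ih1, ih2⟩ := ih (pvInsert m a b) (fun q hq => hv q (List.mem_cons_of_mem _ hq)) h1
    refine ⟨ih1, fun x => ?_⟩
    simp only [List.foldl_cons] at *
    rw [ih2 x, h2 x]
    simp only [pvCov, List.mem_cons]
    constructor
    · rintro ((h' | h') | h')
      · exact Or.inr ⟨(a, b), Or.inl rfl, h'⟩
      · exact Or.inl h'
      · obtain ⟨q, hq, hqx⟩ := h'
        exact Or.inr ⟨q, Or.inr hq, hqx⟩
    · rintro (h' | ⟨q, (rfl | hq), hqx⟩)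
      · exact Or.inl (Or.inr h')
      · exact Or.inl (Or.inl hqx)
      · exact Or.inr ⟨q, hq, hqx⟩

-- ---- step 7: canonical lists with the same coverage are equal ----

theorem pvCanon_unique (M N : List (Int × Int)) (hM : pvCanon M) (hN : pvCanon N)
    (h : ∀ x, pvCov M x ↔ pvCov N x) : M = N := by
  induction M generalizing N with
  | nil =>
    cases N with
    | nil => rfl
    | cons q N =>
      obtain ⟨c, d⟩ := q
      exfalso
      have : pvCov [] c := (h c).mpr ⟨(c, d), by simp, le_refl c, hN.1 (c, d) (by simp)⟩
      simp [pvCov] at this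
  | cons p M ih =>
    obtain ⟨a, b⟩ := p
    have hab : a ≤ b := hM.1 (a, b) (by simp)
    cases N with
    | nil =>
      exfalso
      have : pvCov [] a := (h a).mp ⟨(a, b), by simp, le_refl a, hab⟩
      simp [pvCov] at this
    | cons q N =>
      obtain ⟨c, d⟩ := q
      have hcd : c ≤ d := hN.1 (c, d) (by simp)
      -- a = c
      have hMlow : ∀ p ∈ (a, b) :: M, a ≤ p.1 := by
        intro p hp'
        rcases List.mem_cons.mp hp' with rfl | hp
        · exact le_refl a
        · have := pvCanon_tail_gt a b M hM p hp; omega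
      have hNlow : ∀ p ∈ (c, d) :: N, c ≤ p.1 := by
        intro p hp'
        rcases List.mem_cons.mp hp' with rfl | hp
        · exact le_refl c
        · have := pvCanon_tail_gt c d N hN p hp; omega
      have hac : a = c := by
        have h1 : pvCov ((c, d) :: N) a := (h a).mp ⟨(a, b), by simp, le_refl a, hab⟩
        have h2 : pvCov ((a, b) :: M) c := (h c).mpr ⟨(c, d), by simp, le_refl c, hcd⟩
        obtain ⟨q1, hq1, hx1⟩ := h1
        obtain ⟨q2, hq2, hx2⟩ := h2
        have := hNlow q1 hq1
        have := hMlow q2 hq2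
        omega
      -- b = d
      have hbd : b = d := by
        by_contra hne
        rcases lt_or_gt_of_ne hne with hlt | hgt
        · have h1 : pvCov ((a, b) :: M) (b + 1) :=
            (h (b + 1)).mpr ⟨(c, d), by simp, by omega, by omega⟩
          obtain ⟨q, hq, hx⟩ := h1
          rcases List.mem_cons.mp hq with rfl | hq
          · omega
          · have := pvCanon_tail_gt a b M hM q hq; omega
        · have h1 : pvCov ((c, d) :: N) (d + 1) :=
            (h (d + 1)).mp ⟨(a, b), by simp, by omega, by omega⟩
          obtain ⟨q, hq, hx⟩ := h1
          rcases List.mem_cons.mp hq with rfl | hq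
          · omega
          · have := pvCanon_tail_gt c d N hN q hq; omega
      subst hac; subst hbd
      -- tails have equal coverage
      have htails : ∀ x, pvCov M x ↔ pvCov N x := by
        intro x
        by_cases hx : b + 1 < x
        · have e1 : pvCov M x ↔ pvCov ((a, b) :: M) x := by
            simp only [pvCov, List.mem_cons]
            constructor
            · rintro ⟨q, hq, hqx⟩; exact ⟨q, Or.inr hq, hqx⟩
            · rintro ⟨q, (rfl | hq), hqx⟩
              · omega
              · exact ⟨q, hq, hqx⟩
          have e2 : pvCov N x ↔ pvCov ((a, b) :: N) x := by
            simp only [pvCov, List.mem_cons]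
            constructor
            · rintro ⟨q, hq, hqx⟩; exact ⟨q, Or.inr hq, hqx⟩
            · rintro ⟨q, (rfl | hq), hqx⟩
              · omega
              · exact ⟨q, hq, hqx⟩
          rw [e1, e2]; exact h x
        · constructor
          · rintro ⟨q, hq, hqx⟩
            have := pvCanon_tail_gt a b M hM q hq; omega
          · rintro ⟨q, hq, hqx⟩
            have := pvCanon_tail_gt a b N hN q hq; omega
      rw [ih N (pvCanon_tail a b M hM) (pvCanon_tail a b N hN) htails]

-- ---- step 8: the intervals are valid, and coverage survives sorting ----

theorem pvRowInterval_valid (sx sy bx by_ dist ty : Int) (p : Int × Int)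
    (h : pvRowInterval sx sy bx by_ dist ty = some p) : p.1 ≤ p.2 := by
  obtain ⟨p1, p2⟩ := p
  simp only [pvRowInterval] at h
  split_ifs at h <;> simp_all [Prod.ext_iff] <;> omega

theorem pvIvs_valid (s b : List (Int × Int)) (d : List Int) (ty : Int) :
    ∀ p ∈ pvIvs s b d ty, p.1 ≤ p.2 := by
  intro p hp
  rw [pvIvs, List.mem_filterMap] at hp
  obtain ⟨t, _, ht⟩ := hp
  exact pvRowInterval_valid _ _ _ _ _ _ p ht

theorem pvCov_perm (l l' : List (Int × Int)) (h : l.Perm l') (x : Int) :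
    pvCov l x ↔ pvCov l' x := by
  simp only [pvCov]
  constructor
  · rintro ⟨q, hq, hx⟩; exact ⟨q, h.mem_iff.mp hq, hx⟩
  · rintro ⟨q, hq, hx⟩; exact ⟨q, h.mem_iff.mpr hq, hx⟩

-- ===== VERDICT (by name: the statement is the Claim_ definition above) =====
theorem find_distress_beacon_spec : Claim_equal_find_distress_beacon := by
  intro sensors beacons distances target_y _
  unfold Spec_find_distress_beacon
  -- A's side
  have hA : find_distress_beacon sensors beacons distances target_y
      = pvMergeRec (PySem.List.sorted2 (pvIvs sensors beacons distances target_y) Prod.fst Prod.snd false) := by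
    unfold find_distress_beacon
    rw [pv_foldA_eq, List.nil_append, ← pvIvs, pv_merge_eq_mergeRec]
  -- B's side
  have hB : find_distress_beacon_alt sensors beacons distances target_y
      = (pvIvs sensors beacons distances target_y).foldl (fun m p => pvInsert m p.1 p.2) [] := by
    unfold find_distress_beacon_alt pvIvs
    rw [List.foldl_filterMap]
    congr 1
    funext m t
    cases pvRowInterval t.1.1 t.1.2 t.2.1.1 t.2.1.2 t.2.2 target_y <;> rfl
  set ivs := pvIvs sensors beacons distances target_y with hivs
  have hvalid := pvIvs_valid sensors beacons distances target_y
  rw [← hivs] at hvalid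
  set sivs := PySem.List.sorted2 ivs Prod.fst Prod.snd false with hsivs
  have hperm : sivs.Perm ivs := PySem.List.sorted2_perm ivs Prod.fst Prod.snd false
  have hsvalid : ∀ p ∈ sivs, p.1 ≤ p.2 := fun p hp => hvalid p (hperm.mem_iff.mp hp)
  have hpair : sivs.Pairwise (fun p q : Int × Int => p.1 ≤ q.1) := by
    refine (pv_sorted2_pairwise ivs).imp ?_
    intro p q h; omega
  have hcanonA := pvMergeRec_canon sivs hsvalid hpair
  have hcanonB := (pv_foldInsert_spec ivs [] hvalid ⟨by simp, by simp⟩).1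
  have hcovEq : ∀ x, pvCov (pvMergeRec sivs) x ↔ pvCov (ivs.foldl (fun m p => pvInsert m p.1 p.2) []) x := by
    intro x
    rw [pvMergeRec_cov sivs hsvalid hpair x, pvCov_perm sivs ivs hperm x,
        (pv_foldInsert_spec ivs [] hvalid ⟨by simp, by simp⟩).2 x]
    simp [pvCov]
  rw [hA, hB]
  exact pvCanon_unique _ _ hcanonA hcanonB hcovEq
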